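-- pv_equiv track=rewrite | github.com/KimJinung/ProblemSolving | Programmers/Lv0/코드처리하기/solution.py | solution
-- ===== SOURCE A (Python) =====
-- def solution(code):
--     answer = ""
--     mode = False
--
--     for i in range(len(code)):
--         if code[i].isalpha():
--             if (not mode and i % 2 == 0):
--                 answer += code[i]
--             elif (mode and i % 2 == 1):
--                 answer += code[i]
--         else:
--             mode = not mode
--
--     return answer if answer != "" else "EMPTY"
-- ===== SOURCE B (Python) =====
-- def solution(code):
--     # Pass 1: prefix table, pref[i] = number of non-alpha chars strictly before index i.
--     pref = [0]
--     for ch in code: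
--         pref.append(pref[-1] + (0 if ch.isalpha() else 1))
--     # Pass 2: keep alpha chars whose index parity equals the prefix non-alpha parity.
--     answer = "".join(ch for i, (ch, k) in enumerate(zip(code, pref))
--                      if ch.isalpha() and i % 2 == k % 2)
--     return answer if answer != "" else "EMPTY"
-- ===== Notes on version B (the rewrite author's own statement) =====
-- stated objective: alternative
-- what changed: Replaces the single stateful loop (running boolean mode toggled in place) with two separate passes: a precomputed prefix table of non-alpha counts, then a stateless filter comparing index parity with prefix-count parity.
import Mathlib
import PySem

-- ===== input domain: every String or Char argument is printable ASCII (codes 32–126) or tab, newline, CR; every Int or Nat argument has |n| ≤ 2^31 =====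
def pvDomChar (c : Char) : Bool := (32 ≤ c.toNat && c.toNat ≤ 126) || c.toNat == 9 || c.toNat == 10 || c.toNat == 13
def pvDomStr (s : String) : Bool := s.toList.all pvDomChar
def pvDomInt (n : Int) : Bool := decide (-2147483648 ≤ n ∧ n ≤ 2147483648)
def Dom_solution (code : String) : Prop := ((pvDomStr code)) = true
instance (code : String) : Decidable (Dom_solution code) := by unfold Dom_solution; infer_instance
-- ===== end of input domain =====

-- B replaces A's single stateful loop (a running mode boolean) by a prefix table of
-- non-alpha counts plus a stateless filtering pass; same return value (alternative, not faster).

-- ===== PORT A =====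
-- the for-loop over range(len(code)) with index i, accumulator `answer`, flag `mode`
def pvLoopA : List Char → Nat → List Char → Bool → List Char
  | [], _, answer, _ => answer
  | c :: rest, i, answer, mode =>
    if PySem.Chars.isalpha c then
      if !mode && i % 2 == 0 then pvLoopA rest (i + 1) (answer ++ [c]) mode
      else if mode && i % 2 == 1 then pvLoopA rest (i + 1) (answer ++ [c]) mode
      else pvLoopA rest (i + 1) answer mode
    else pvLoopA rest (i + 1) answer (!mode)

def solution (code : String) : String :=
  if String.ofList (pvLoopA code.toList 0 [] false) ≠ "" then String.ofList (pvLoopA code.toList 0 [] false)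
  else "EMPTY"

-- ===== PORT B =====
-- pass 1 of Source B: pref[i] = number of non-alpha chars strictly before index i
def pvPrefB (cs : List Char) : List Nat :=
  cs.foldl (fun pref ch => pref ++ [pref.getLastD 0 + (if PySem.Chars.isalpha ch then 0 else 1)]) [0]

-- pass 2 of Source B: ''.join over enumerate(zip(code, pref)) with the parity test
def pvAnswerB (cs : List Char) : List Char :=
  ((PySem.List.enumerate (cs.zip (pvPrefB cs))).filter
      (fun p => PySem.Chars.isalpha p.2.1 && p.1 % 2 == (p.2.2 : Int) % 2)).map (fun p => p.2.1)

def solution_alt (code : String) : String :=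
  if pvAnswerB code.toList ≠ [] then String.ofList (pvAnswerB code.toList) else "EMPTY"

-- ===== PRECONDITION & SPEC =====
def Spec_solution (code : String) (out : String) : Prop := out = solution_alt code
instance (code : String) (out : String) : Decidable (Spec_solution code out) := by unfold Spec_solution; infer_instance

-- ===== CLAIM (what is proved, stated in full; the proofs are below) =====
def Claim_equal_solution : Prop := ∀ (code : String), Dom_solution code → Spec_solution code (solution code)

-- ===== LEMMAS AND PROOFS =====

-- prefix-count scan, the functional form of B's first pass
def pvScan (k : Nat) : List Char → List Nat
  | [] => [k]
  | c :: r => k :: pvScan (k + (if PySem.Chars.isalpha c then 0 else 1)) r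

-- common functional form of both programs' selection
def pvGo : List Char → Int → Nat → List Char
  | [], _, _ => []
  | c :: r, i, k =>
    (if PySem.Chars.isalpha c && i % 2 == (k : Int) % 2 then [c] else []) ++
      pvGo r (i + 1) (k + (if PySem.Chars.isalpha c then 0 else 1))

lemma pvDropLast (acc : List Nat) (h : acc ≠ []) : acc.dropLast ++ [acc.getLastD 0] = acc := by
  conv_rhs => rw [← List.dropLast_append_getLast h]
  simp [List.getLastD_eq_getLast?, List.getLast?_eq_some_getLast h]

lemma pvFoldl_eq_scan : ∀ (cs : List Char) (acc : List Nat), acc ≠ [] →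
    cs.foldl (fun pref ch => pref ++ [pref.getLastD 0 + (if PySem.Chars.isalpha ch then 0 else 1)]) acc
      = acc.dropLast ++ pvScan (acc.getLastD 0) cs := by
  intro cs
  induction cs with
  | nil =>
    intro acc h
    simp only [List.foldl_nil, pvScan]
    exact (pvDropLast acc h).symm
  | cons c r ih =>
    intro acc h
    simp only [List.foldl_cons]
    rw [ih _ (by simp), pvScan]
    rw [List.dropLast_concat, List.getLastD_concat]
    conv_rhs => rw [← List.singleton_append, ← List.append_assoc, pvDropLast acc h]

lemma pvGo_parity : ∀ (r : List Char) (i : Int) (k k' : Nat), k % 2 = k' % 2 →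
    pvGo r i k = pvGo r i k' := by
  intro r
  induction r with
  | nil => intro i k k' _; rfl
  | cons c t ih =>
    intro i k k' h
    have h2 : ((k : Int)) % 2 = ((k' : Int)) % 2 := by omega
    simp only [pvGo, h2]
    congr 1
    exact ih (i + 1) _ _ (by omega)

lemma pvFilt_eq_go : ∀ (r : List Char) (i : Int) (k : Nat),
    ((PySem.List.enumerate (r.zip (pvScan k r)) i).filter
        (fun p => PySem.Chars.isalpha p.2.1 && p.1 % 2 == (p.2.2 : Int) % 2)).map (fun p => p.2.1)
      = pvGo r i k := by
  intro r
  induction r with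
  | nil => intro i k; simp [pvScan, PySem.List.enumerate_nil, pvGo]
  | cons c t ih =>
    intro i k
    simp only [pvScan, List.zip_cons_cons, PySem.List.enumerate_cons, List.filter_cons, pvGo]
    by_cases hc : (PySem.Chars.isalpha c && i % 2 == (k : Int) % 2) = true
    · simp only [hc, if_pos, List.map_cons, ih, List.singleton_append]
    · simp only [if_neg hc, List.nil_append]
      exact ih (i + 1) _

lemma pvLoopA_eq_go : ∀ (r : List Char) (i : Nat) (answer : List Char) (mode : Bool),
    pvLoopA r i answer mode = answer ++ pvGo r (i : Int) (if mode then 1 else 0) := by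
  intro r
  induction r with
  | nil => intro i answer mode; simp [pvLoopA, pvGo]
  | cons c t ih =>
    intro i answer mode
    have hcast : (((i + 1 : Nat)) : Int) = (i : Int) + 1 := by push_cast; ring
    by_cases ha : PySem.Chars.isalpha c = true
    · rcases mode with _ | _ <;>
        rcases Nat.mod_two_eq_zero_or_one i with hi | hi <;>
        · have hInt : ((i : Int) % 2) = ((i % 2 : Nat) : Int) := by omega
          simp [pvLoopA, pvGo, ha, hi, ih, hInt, hcast, List.append_assoc]
    · simp only [Bool.not_eq_true] at ha
      simp only [pvLoopA, pvGo, ha, Bool.false_and, Bool.false_eq_true, if_false]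
      rw [ih, hcast]
      have hp : pvGo t ((i : Int) + 1) ((if mode then 1 else 0) + 1)
          = pvGo t ((i : Int) + 1) (if !mode then 1 else 0) := by
        apply pvGo_parity; rcases mode with _ | _ <;> simp
      simp [hp]

-- ===== VERDICT (by name: the statement is the Claim_ definition above) =====
theorem solution_spec : Claim_equal_solution := by
  intro code _
  unfold Spec_solution solution solution_alt pvAnswerB pvPrefB
  rw [pvFoldl_eq_scan _ [0] (by simp)]
  rw [show (([0] : List Nat).dropLast) = [] from rfl, show (([0] : List Nat).getLastD 0) = 0 from rfl,
    List.nil_append]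
  rw [pvFilt_eq_go, pvLoopA_eq_go]
  simp only [Nat.cast_zero, if_neg (by simp : ¬ (false = true)), List.nil_append]
  by_cases h : pvGo code.toList 0 0 = []
  · simp [h]
  · simp [h]
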